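-- pv_equiv track=rewrite | github.com/francocuervoo/ip | parciales/parcial_02/submission.py | esta_bien_formado
-- ===== SOURCE A (Python) =====
-- def esta_bien_formado ( s : str) -> bool:
--     largo_caracter : int = len(s)
--
--     for i in range(largo_caracter):
--         if not es_mas_menos_o_digitos(s[i]):
--             return False
--
--         if not es_un_digito(s[largo_caracter -1]):
--             return False
--
--     if hay_dos_operadores_juntos(s):
--         return False
--
--     return True
--
-- def es_mas_menos_o_digitos ( caracter : str ) -> bool:
--     digitos : list[str] = ["0", "1", "2", "3", "4", "5", "6", "7", "8", "9", "+", "-"]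
--
--     for digito in digitos:
--         if digito == caracter:
--             return True
--     return False
--
-- def es_un_digito ( caracter : str) -> bool:
--     digitos : list[str] = ["0", "1", "2", "3", "4", "5", "6", "7", "8", "9"]
--
--     for digito in digitos:
--         if caracter == digito:
--             return True
--     return False
--
-- def hay_dos_operadores_juntos ( s : str) -> bool:
--     contador : int = 0
--
--     for r in s:
--         if contador > 1:
--             return True
--
--         if r == "+" or r == "-":
--             contador +=1
--
--         else:
--             contador = 0
--
--     if contador > 1:
--         return True
--
--     return False
-- ===== SOURCE B (Python) =====
-- def esta_bien_formado(s: str) -> bool: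
--     # Single left-to-right DFA pass: track whether the previous char was an operator.
--     prev_op = False
--     for c in s:
--         if c == "+" or c == "-":
--             if prev_op:
--                 return False
--             prev_op = True
--         elif "0" <= c <= "9":
--             prev_op = False
--         else:
--             return False
--     return not prev_op
-- ===== Notes on version B (the rewrite author's own statement) =====
-- stated objective: simpler
-- what changed: A makes three scans (a per-index loop that re-tests the charset of s[i] and re-tests the last character on every iteration, plus a separate consecutive-operator counter pass); B is one left-to-right DFA pass tracking only whether the previous character was an operator.
import Mathlib
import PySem

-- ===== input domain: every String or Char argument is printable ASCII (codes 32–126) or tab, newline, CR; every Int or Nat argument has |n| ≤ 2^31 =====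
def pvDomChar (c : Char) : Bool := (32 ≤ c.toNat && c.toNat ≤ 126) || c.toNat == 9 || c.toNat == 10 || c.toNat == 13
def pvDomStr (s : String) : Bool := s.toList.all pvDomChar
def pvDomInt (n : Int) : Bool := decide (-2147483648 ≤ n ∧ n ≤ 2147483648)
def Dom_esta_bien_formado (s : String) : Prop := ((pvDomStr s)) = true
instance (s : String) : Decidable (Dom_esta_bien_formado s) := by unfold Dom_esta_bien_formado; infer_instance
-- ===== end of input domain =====

-- B replaces A's three scans (per-index charset check re-testing the last char every
-- iteration, plus a separate consecutive-operator counter pass) by one DFA pass that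
-- only tracks whether the previous character was an operator (objective: simpler).

-- ===== PORT A =====
def es_mas_menos_o_digitos (caracter : Char) : Bool :=
  (['0','1','2','3','4','5','6','7','8','9','+','-'] : List Char).any
    (fun digito => digito == caracter)

def es_un_digito (caracter : Char) : Bool :=
  (['0','1','2','3','4','5','6','7','8','9'] : List Char).any
    (fun digito => caracter == digito)

def hayAux : List Char → Int → Bool
  | [], contador => contador > 1
  | r :: rest, contador =>
    if contador > 1 then true
    else if r == '+' || r == '-' then hayAux rest (contador + 1)
    else hayAux rest 0

def hay_dos_operadores_juntos (s : String) : Bool := hayAux s.toList 0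

-- the indices i in range(largo) and largo-1 are always in range, so getD's default is never read
def ebfLoop (cs : List Char) (largo : Nat) (i : Nat) : Bool :=
  if h : i < largo then
    if !es_mas_menos_o_digitos (cs.getD i ' ') then false
    else if !es_un_digito (cs.getD (largo - 1) ' ') then false
    else ebfLoop cs largo (i + 1)
  else true
termination_by largo - i
decreasing_by omega

def esta_bien_formado (s : String) : Bool :=
  let largo_caracter := s.toList.length
  if ebfLoop s.toList largo_caracter 0 then
    if hay_dos_operadores_juntos s then false else true
  else false

-- ===== PORT B =====
def ebfAltLoop : List Char → Bool → Bool
  | [], prevOp => !prevOp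
  | c :: rest, prevOp =>
    if c == '+' || c == '-' then
      if prevOp then false else ebfAltLoop rest true
    else if '0' ≤ c ∧ c ≤ '9' then ebfAltLoop rest false
    else false

def esta_bien_formado_alt (s : String) : Bool := ebfAltLoop s.toList false

-- ===== PRECONDITION & SPEC =====
def Spec_esta_bien_formado (s : String) (out : Bool) : Prop := out = esta_bien_formado_alt s
instance (s : String) (out : Bool) : Decidable (Spec_esta_bien_formado s out) := by unfold Spec_esta_bien_formado; infer_instance

-- ===== CLAIM (what is proved, stated in full; the proofs are below) =====
def Claim_equal_esta_bien_formado : Prop := ∀ (s : String), Dom_esta_bien_formado s → Spec_esta_bien_formado s (esta_bien_formado s)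

-- ===== LEMMAS AND PROOFS =====

-- proof-side vocabulary: "is an operator", "two adjacent operators", "last char is a digit",
-- and the common normal form bfS both programs are reduced to
def opA (c : Char) : Bool := c == '+' || c == '-'

def twoAdj : List Char → Bool
  | a :: b :: t => (opA a && opA b) || twoAdj (b :: t)
  | _ => false

def lastDigB : List Char → Bool
  | [] => true
  | [c] => es_un_digito c
  | _ :: c :: t => lastDigB (c :: t)

def bfS (cs : List Char) : Bool :=
  cs.all es_mas_menos_o_digitos && lastDigB cs && !twoAdj cs

def opHead : List Char → Bool
  | [] => false
  | c :: _ => opA c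

-- character-class facts
theorem dig_eq (c : Char) : (decide ('0' ≤ c ∧ c ≤ '9')) = es_un_digito c := by
  simp only [es_un_digito, List.any]
  rw [Bool.eq_iff_iff]
  simp [Char.le_def, UInt32.le_iff_toNat_le, Char.ext_iff, ← UInt32.toNat_inj]
  omega

theorem valid_eq (c : Char) : es_mas_menos_o_digitos c = (opA c || es_un_digito c) := by
  simp only [es_mas_menos_o_digitos, es_un_digito, opA, List.any]
  rw [Bool.eq_iff_iff]
  simp [Char.ext_iff, ← UInt32.toNat_inj]
  omega

theorem op_not_dig (c : Char) (h : opA c = true) : es_un_digito c = false := by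
  simp only [opA, Bool.or_eq_true, beq_iff_eq] at h
  rcases h with rfl | rfl <;> decide

-- the counter pass detects exactly "two adjacent operators"
theorem hay2 (t : List Char) : hayAux t 2 = true := by
  cases t <;> simp [hayAux]

theorem hay01 (cs : List Char) :
    hayAux cs 0 = twoAdj cs ∧ hayAux cs 1 = (opHead cs || twoAdj cs) := by
  induction cs with
  | nil => simp [hayAux, twoAdj, opHead]
  | cons c t ih =>
    constructor
    · show hayAux (c :: t) 0 = twoAdj (c :: t)
      simp only [hayAux]
      rw [if_neg (by norm_num : ¬ ((0:Int) > 1))]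
      by_cases h : (c == '+' || c == '-') = true
      · rw [if_pos h, (by norm_num : (0:Int) + 1 = 1), ih.2]
        cases t with
        | nil => simp [twoAdj, opHead]
        | cons b t' => simp [twoAdj, opHead, opA, h]
      · rw [if_neg h, ih.1]
        have hop : opA c = false := by simpa [opA] using h
        cases t with
        | nil => simp [twoAdj]
        | cons b t' => simp [twoAdj, hop]
    · show hayAux (c :: t) 1 = (opHead (c :: t) || twoAdj (c :: t))
      simp only [hayAux]
      rw [if_neg (by norm_num : ¬ ((1:Int) > 1))]
      by_cases h : (c == '+' || c == '-') = true
      · have hh : opHead (c :: t) = true := by simpa [opHead, opA] using h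
        rw [if_pos h, (by norm_num : (1:Int) + 1 = 2), hay2, hh]
        simp
      · have hop : opA c = false := by simpa [opA] using h
        rw [if_neg h, ih.1]
        cases t with
        | nil => simp [twoAdj, opHead, hop]
        | cons b t' => simp [twoAdj, opHead, hop]

-- A's index loop, characterized
theorem getD_at (cs : List Char) (i : Nat) (h : i < cs.length) : cs.getD i ' ' = cs[i] := by
  simp [List.getD_eq_getElem?_getD, List.getElem?_eq_getElem h]

theorem loopA (cs : List Char) (i : Nat) :
    ebfLoop cs cs.length i =
      ((cs.drop i).all es_mas_menos_o_digitos &&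
        (decide (cs.length ≤ i) || es_un_digito (cs.getD (cs.length - 1) ' '))) := by
  fun_induction ebfLoop cs cs.length i with
  | case1 i h hc =>
    rw [List.drop_eq_getElem_cons h, getD_at cs i h] at *
    simp only [Bool.not_eq_eq_eq_not, Bool.not_true] at hc
    simp only [List.all_cons, hc, Bool.false_and]
  | case2 i h hc hd =>
    rw [getD_at cs (cs.length - 1) (by omega)] at *
    simp only [Bool.not_eq_eq_eq_not, Bool.not_true] at hd
    simp only [hd, Bool.or_false, decide_eq_false (Nat.not_le.mpr h), Bool.and_false]
  | case3 i h hc hd ih =>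
    rw [getD_at cs i h, getD_at cs (cs.length - 1) (by omega)] at *
    simp only [Bool.not_eq_eq_eq_not, Bool.not_true, Bool.not_eq_false] at hc hd
    rw [ih, List.drop_eq_getElem_cons h]
    simp only [List.all_cons, hc, hd, Bool.true_and, Bool.or_true, Bool.and_true]
  | case4 i h =>
    simp [List.drop_eq_nil_of_le (Nat.not_lt.mp h), Nat.not_lt.mp h]

-- the '||' of the loop characterization at i = 0 is exactly lastDigB
theorem lastdig_eq (cs : List Char) :
    (decide (cs.length ≤ 0) || es_un_digito (cs.getD (cs.length - 1) ' ')) = lastDigB cs := by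
  induction cs with
  | nil => simp [lastDigB]
  | cons c t ih =>
    cases t with
    | nil => simp [lastDigB]
    | cons b t' =>
      simp only [lastDigB]
      rw [← ih]
      simp [List.length_cons]
      rfl

theorem A_eq_S (s : String) : esta_bien_formado s = bfS s.toList := by
  simp only [esta_bien_formado, hay_dos_operadores_juntos]
  rw [loopA]
  simp only [(hay01 s.toList).1, List.drop_zero, lastdig_eq s.toList]
  cases h1 : s.toList.all es_mas_menos_o_digitos <;>
    cases h2 : lastDigB s.toList <;>
    cases h3 : twoAdj s.toList <;>
    simp [bfS, h1, h2, h3]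

-- B's DFA pass, characterized
theorem altS (cs : List Char) (p : Bool) :
    ebfAltLoop cs p = ((!p || (!(cs.isEmpty) && !opHead cs)) && bfS cs) := by
  induction cs generalizing p with
  | nil => cases p <;> simp [ebfAltLoop, bfS, lastDigB, twoAdj, opHead]
  | cons c t ih =>
    simp only [ebfAltLoop]
    by_cases hop : (c == '+' || c == '-') = true
    · have hopA : opA c = true := hop
      have hdigf : es_un_digito c = false := op_not_dig c hopA
      have hval : es_mas_menos_o_digitos c = true := by rw [valid_eq, hopA]; rfl
      cases p with
      | true => simp [hop, opHead, hopA]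
      | false =>
        simp only [hop, if_true, Bool.not_false, Bool.true_or]
        rw [ih]
        cases t with
        | nil => simp [bfS, lastDigB, twoAdj, opHead, hval, hdigf]
        | cons b t' =>
          simp only [bfS, lastDigB, twoAdj, opHead, List.all_cons, List.isEmpty_cons,
            hval, hopA, Bool.true_and]
          cases h1 : opA b <;> cases h2 : twoAdj (b :: t') <;>
            cases h3 : (b :: t').all es_mas_menos_o_digitos <;>
            cases h4 : lastDigB (b :: t') <;> simp
    · by_cases hd : ('0' ≤ c ∧ c ≤ '9')
      · have hdig : es_un_digito c = true := by rw [← dig_eq]; simpa using hd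
        have hopA : opA c = false := by simpa [opA] using hop
        have hval : es_mas_menos_o_digitos c = true := by rw [valid_eq, hdig, hopA]; rfl
        rw [if_neg hop, if_pos hd, ih]
        simp only [Bool.not_false, Bool.true_or, Bool.true_and]
        cases t with
        | nil => simp [bfS, lastDigB, twoAdj, opHead, hval, hdig, hopA]
        | cons b t' =>
          simp [bfS, lastDigB, twoAdj, opHead, List.all_cons, hval, hopA]
      · have hdig : es_un_digito c = false := by rw [← dig_eq]; simpa using hd
        have hopA : opA c = false := by simpa [opA] using hop
        have hval : es_mas_menos_o_digitos c = false := by rw [valid_eq, hdig, hopA]; rfl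
        simp [hop, if_neg hd, bfS, hval]

theorem B_eq_S (s : String) : esta_bien_formado_alt s = bfS s.toList := by
  unfold esta_bien_formado_alt
  rw [altS]
  simp

-- ===== VERDICT (by name: the statement is the Claim_ definition above) =====
theorem esta_bien_formado_spec : Claim_equal_esta_bien_formado := by
  intro s _
  unfold Spec_esta_bien_formado
  rw [A_eq_S, B_eq_S]
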